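-- pv_equiv track=rewrite | github.com/Roflz/IL_bot | ilbot/ui/simple_recorder/action_plans.py | _line_to
-- ===== SOURCE A (Python) =====
-- def _line_to(x0: int, y0: int, x1: int, y1: int, max_steps: int = 14):
--     points = []
--     dx = abs(x1 - x0); dy = abs(y1 - y0)
--     sx = 1 if x0 < x1 else -1 if x0 > x1 else 0
--     sy = 1 if y0 < y1 else -1 if y0 > y1 else 0
--     x, y = x0, y0
--     if dx >= dy:
--         err = dx // 2
--         for _ in range(max_steps):
--             if x == x1 and y == y1: break
--             x += sx; err -= dy
--             if err < 0: y += sy; err += dx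
--             points.append((x, y))
--     else:
--         err = dy // 2
--         for _ in range(max_steps):
--             if x == x1 and y == y1: break
--             y += sy; err -= dx
--             if err < 0: x += sx; err += dy
--             points.append((x, y))
--     return points
-- ===== SOURCE B (Python) =====
-- def _line_to(x0: int, y0: int, x1: int, y1: int, max_steps: int = 14):
--     dx = abs(x1 - x0); dy = abs(y1 - y0)
--     sx = (x1 > x0) - (x1 < x0)
--     sy = (y1 > y0) - (y1 < y0)
--     if dx >= dy:
--         n = min(max(max_steps, 0), dx)
--         return [(x0 + sx * i, y0 + sy * ((i * dy - dx // 2 + dx - 1) // dx))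
--                 for i in range(1, n + 1)]
--     else:
--         n = min(max(max_steps, 0), dy)
--         return [(x0 + sx * ((i * dx - dy // 2 + dy - 1) // dy), y0 + sy * i)
--                 for i in range(1, n + 1)]
-- ===== Notes on version B (the rewrite author's own statement) =====
-- stated objective: alternative
-- what changed: Replaces the incremental Bresenham error accumulator with a closed-form floor-division formula computing each point's minor-axis offset directly from its step index, building the list in one comprehension of length min(max_steps, major_delta) instead of a stateful loop with break tests.
import Mathlib
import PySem

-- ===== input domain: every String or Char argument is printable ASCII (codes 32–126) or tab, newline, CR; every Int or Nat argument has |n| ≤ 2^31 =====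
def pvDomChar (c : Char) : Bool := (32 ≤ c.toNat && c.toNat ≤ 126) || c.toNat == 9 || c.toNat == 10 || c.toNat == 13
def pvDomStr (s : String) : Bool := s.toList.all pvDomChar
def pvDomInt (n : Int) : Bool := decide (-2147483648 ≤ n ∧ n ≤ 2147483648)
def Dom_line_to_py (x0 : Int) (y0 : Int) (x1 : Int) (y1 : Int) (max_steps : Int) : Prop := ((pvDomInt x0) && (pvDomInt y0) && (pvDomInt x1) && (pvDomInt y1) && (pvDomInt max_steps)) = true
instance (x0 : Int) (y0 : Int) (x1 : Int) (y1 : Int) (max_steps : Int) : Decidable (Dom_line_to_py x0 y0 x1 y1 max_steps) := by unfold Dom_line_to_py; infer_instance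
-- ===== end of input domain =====

-- B replaces A's incremental Bresenham error accumulator by a closed-form floor-division
-- formula for the minor-axis offset at each step index (objective: alternative).

-- ===== PORT A =====
-- A's major-x loop: for _ in range(max_steps): break test, step x, error update, append.
def lineA_loopX (x1 y1 sx sy dx dy : Int) : Nat → Int → Int → Int → List (Int × Int) → List (Int × Int)
  | 0, _, _, _, pts => pts
  | fuel+1, x, y, err, pts =>
    if x = x1 ∧ y = y1 then pts
    else
      let x' := x + sx
      let err' := err - dy
      if err' < 0 then
        lineA_loopX x1 y1 sx sy dx dy fuel x' (y + sy) (err' + dx) (pts ++ [(x', y + sy)])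
      else
        lineA_loopX x1 y1 sx sy dx dy fuel x' y err' (pts ++ [(x', y)])

-- A's major-y loop (the else branch), symmetric.
def lineA_loopY (x1 y1 sx sy dx dy : Int) : Nat → Int → Int → Int → List (Int × Int) → List (Int × Int)
  | 0, _, _, _, pts => pts
  | fuel+1, x, y, err, pts =>
    if x = x1 ∧ y = y1 then pts
    else
      let y' := y + sy
      let err' := err - dx
      if err' < 0 then
        lineA_loopY x1 y1 sx sy dx dy fuel (x + sx) y' (err' + dy) (pts ++ [(x + sx, y')])
      else
        lineA_loopY x1 y1 sx sy dx dy fuel x y' err' (pts ++ [(x, y')])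

def line_to_py (x0 : Int) (y0 : Int) (x1 : Int) (y1 : Int) (max_steps : Int) : List (Int × Int) :=
  let dx := |x1 - x0|
  let dy := |y1 - y0|
  let sx : Int := if x0 < x1 then 1 else if x0 > x1 then -1 else 0
  let sy : Int := if y0 < y1 then 1 else if y0 > y1 then -1 else 0
  if dx ≥ dy then
    lineA_loopX x1 y1 sx sy dx dy max_steps.toNat x0 y0 (PySem.Int.floordiv dx 2) []
  else
    lineA_loopY x1 y1 sx sy dx dy max_steps.toNat x0 y0 (PySem.Int.floordiv dy 2) []

-- ===== PORT B =====
def line_to_py_alt (x0 : Int) (y0 : Int) (x1 : Int) (y1 : Int) (max_steps : Int) : List (Int × Int) :=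
  let dx := |x1 - x0|
  let dy := |y1 - y0|
  let sx : Int := (if x1 > x0 then 1 else 0) - (if x1 < x0 then 1 else 0)
  let sy : Int := (if y1 > y0 then 1 else 0) - (if y1 < y0 then 1 else 0)
  if dx ≥ dy then
    let n := min (max max_steps 0) dx
    (PySem.List.pyRange 1 (n + 1)).map (fun i =>
      (x0 + sx * i, y0 + sy * PySem.Int.floordiv (i * dy - PySem.Int.floordiv dx 2 + dx - 1) dx))
  else
    let n := min (max max_steps 0) dy
    (PySem.List.pyRange 1 (n + 1)).map (fun i =>
      (x0 + sx * PySem.Int.floordiv (i * dx - PySem.Int.floordiv dy 2 + dy - 1) dy, y0 + sy * i))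

-- ===== PRECONDITION & SPEC =====
def Spec_line_to_py (x0 : Int) (y0 : Int) (x1 : Int) (y1 : Int) (max_steps : Int) (out : List (Int × Int)) : Prop := out = line_to_py_alt x0 y0 x1 y1 max_steps
instance (x0 : Int) (y0 : Int) (x1 : Int) (y1 : Int) (max_steps : Int) (out : List (Int × Int)) : Decidable (Spec_line_to_py x0 y0 x1 y1 max_steps out) := by unfold Spec_line_to_py; infer_instance

-- ===== CLAIM (what is proved, stated in full; the proofs are below) =====
def Claim_equal_line_to_py : Prop := ∀ (x0 : Int) (y0 : Int) (x1 : Int) (y1 : Int) (max_steps : Int), Dom_line_to_py x0 y0 x1 y1 max_steps → Spec_line_to_py x0 y0 x1 y1 max_steps (line_to_py x0 y0 x1 y1 max_steps)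

-- ===== LEMMAS AND PROOFS =====
lemma floordiv_pin (m k b : Int) (hb : 0 < b) (h1 : k * b ≤ m) (h2 : m < (k + 1) * b) :
    PySem.Int.floordiv m b = k :=
  (PySem.Int.floordiv_eq_iff_of_pos hb).mpr ⟨h1, h2⟩

-- Invariant characterisation of A's major-x loop: after i of dx steps with minor count k
-- and error err = h - i*dy + k*dx ∈ [0, dx), the loop appends exactly the closed-form
-- points for indices i+1 … min (i+fuel) dx.
lemma loopX_eq (x0 y0 x1 y1 sx sy dx dy h : Int)
    (hdx : 0 < dx) (hdy0 : 0 ≤ dy) (hdxy : dy ≤ dx)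
    (hx1 : x1 = x0 + sx * dx) (hy1 : y1 = y0 + sy * dy)
    (hsx : sx = 1 ∨ sx = -1)
    (hh0 : 0 ≤ h) (hh1 : h < dx) :
    ∀ (fuel : Nat) (i k err : Int) (pts : List (Int × Int)),
      0 ≤ i → i ≤ dx →
      err = h - i * dy + k * dx → 0 ≤ err → err < dx →
      lineA_loopX x1 y1 sx sy dx dy fuel (x0 + sx * i) (y0 + sy * k) err pts
        = pts ++ (PySem.List.pyRange (i + 1) (min (i + fuel) dx + 1)).map
            (fun j => (x0 + sx * j, y0 + sy * PySem.Int.floordiv (j * dy - h + dx - 1) dx)) := by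
  intro fuel
  induction fuel with
  | zero =>
    intro i k err pts h0i hidx herr he0 he1
    have hm : min (i + ((0:Nat):Int)) dx = i := by simp; omega
    rw [lineA_loopX, hm,
      show PySem.List.pyRange (i+1) (i+1) = [] by
        simp, List.map_nil, List.append_nil]
  | succ n ih =>
    intro i k err pts h0i hidx herr he0 he1
    by_cases hid : i = dx
    · rw [hid] at herr
      have hk : k = dy := by
        have l1 : dy - 1 < k := by
          have h1 : dx * (dy - 1) < dx * k := by linarith [herr, he0, hh1]
          exact lt_of_mul_lt_mul_left h1 (le_of_lt hdx)
        have l2 : k < dy + 1 := by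
          have h2 : dx * k < dx * (dy + 1) := by linarith [herr, he1, hh0]
          exact lt_of_mul_lt_mul_left h2 (le_of_lt hdx)
        omega
      rw [lineA_loopX, if_pos ⟨by rw [hx1, hid], by rw [hy1, hk]⟩, hid]
      have hm : min (dx + ((n+1 : Nat):Int)) dx = dx := by
        rw [min_eq_right]; push_cast; omega
      rw [hm, show PySem.List.pyRange (dx+1) (dx+1) = [] by
        simp, List.map_nil, List.append_nil]
    · have hilt : i < dx := lt_of_le_of_ne hidx hid
      have hxne : x0 + sx * i ≠ x1 := by
        rw [hx1]; intro hcon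
        have h2 : sx * i = sx * dx := by linarith
        have : i = dx := by rcases hsx with h'|h' <;> (rw [h'] at h2; omega)
        exact hid this
      rw [lineA_loopX, if_neg (fun hcon => hxne hcon.1)]
      simp only []
      have hpeel : PySem.List.pyRange (i + 1) (min (i + ((n+1 : Nat):Int)) dx + 1)
          = (i+1) :: PySem.List.pyRange (i + 1 + 1) (min ((i+1) + (n:Int)) dx + 1) := by
        rw [show i + ((n+1 : Nat):Int) = (i+1) + (n : Int) by push_cast; ring,
          PySem.List.pyRange_one_cons (by omega)]
      by_cases hstep : err - dy < 0
      · rw [if_pos hstep]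
        have harg1 : x0 + sx * i + sx = x0 + sx * (i+1) := by ring
        have harg2 : y0 + sy * k + sy = y0 + sy * (k+1) := by ring
        have herr' : err - dy + dx = h - (i+1) * dy + (k+1) * dx := by linarith [herr]
        rw [harg1, harg2, ih (i+1) (k+1) (err - dy + dx) _ (by omega) (by omega) herr'
          (by linarith) (by linarith)]
        rw [hpeel]
        have hfd : PySem.Int.floordiv ((i+1) * dy - h + dx - 1) dx = k + 1 := by
          apply floordiv_pin _ _ _ hdx
          · linarith [herr', hstep]
          · linarith [herr', hstep]
        simp [hfd, List.append_assoc]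
      · rw [if_neg hstep]
        have harg1 : x0 + sx * i + sx = x0 + sx * (i+1) := by ring
        have herr' : err - dy = h - (i+1) * dy + k * dx := by linarith [herr]
        rw [harg1, ih (i+1) k (err - dy) _ (by omega) (by omega) herr'
          (by linarith) (by linarith)]
        rw [hpeel]
        have hfd : PySem.Int.floordiv ((i+1) * dy - h + dx - 1) dx = k := by
          apply floordiv_pin _ _ _ hdx
          · linarith [herr']
          · linarith [herr']
        simp [hfd, List.append_assoc]

-- loopY is loopX with the two coordinates swapped throughout.
lemma loopY_swap (x1 y1 sx sy dx dy : Int) :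
    ∀ (fuel : Nat) (x y err : Int) (pts : List (Int × Int)),
      lineA_loopY x1 y1 sx sy dx dy fuel x y err pts
        = (lineA_loopX y1 x1 sy sx dy dx fuel y x err (pts.map Prod.swap)).map Prod.swap := by
  intro fuel
  induction fuel with
  | zero => intro x y err pts; simp [lineA_loopX, lineA_loopY, List.map_map]
  | succ n ih =>
    intro x y err pts
    simp only [lineA_loopX, lineA_loopY]
    by_cases hb : x = x1 ∧ y = y1
    · rw [if_pos hb, if_pos ⟨hb.2, hb.1⟩]
      simp [List.map_map]
    · rw [if_neg hb, if_neg (show ¬(y = y1 ∧ x = x1) by tauto)]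
      split_ifs with h
      · rw [ih]; congr 2; simp
      · rw [ih]; congr 2; simp

lemma pvSign_eq (a b : Int) : ((if b > a then (1:Int) else 0) - (if b < a then 1 else 0))
    = (if a < b then (1:Int) else if a > b then -1 else 0) := by
  split_ifs <;> omega

lemma pvSign_mul_abs (a b : Int) :
    b = a + (if a < b then (1:Int) else if a > b then -1 else 0) * |b - a| := by
  split_ifs with h1 h2
  · rw [abs_of_pos (by omega)]; ring_nf
  · rw [abs_of_neg (by omega)]; ring_nf
  · omega

lemma pvSign_pm (a b : Int) (h : ¬ b = a) :
    (if a < b then (1:Int) else if a > b then -1 else 0) = 1 ∨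
    (if a < b then (1:Int) else if a > b then -1 else 0) = -1 := by
  split_ifs <;> omega

lemma loopX_self (x1 y1 sx sy dx dy : Int) (fuel : Nat) (x y err : Int) (pts : List (Int × Int))
    (hx : x = x1) (hy : y = y1) :
    lineA_loopX x1 y1 sx sy dx dy fuel x y err pts = pts := by
  cases fuel <;> simp [lineA_loopX, hx, hy]

lemma half_bounds (d : Int) (hd : 0 < d) :
    0 ≤ PySem.Int.floordiv d 2 ∧ PySem.Int.floordiv d 2 < d := by
  rw [PySem.Int.floordiv_eq_ediv_of_pos (by norm_num)]
  omega

lemma branchX (x0 y0 x1 y1 sx sy dx dy ms : Int)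
    (hdx : 0 < dx) (hdy0 : 0 ≤ dy) (hxy : dy ≤ dx)
    (hx1 : x1 = x0 + sx * dx) (hy1 : y1 = y0 + sy * dy)
    (hsx : sx = 1 ∨ sx = -1) :
    lineA_loopX x1 y1 sx sy dx dy ms.toNat x0 y0 (PySem.Int.floordiv dx 2) []
      = (PySem.List.pyRange 1 (min (max ms 0) dx + 1)).map
          (fun i => (x0 + sx * i, y0 + sy * PySem.Int.floordiv (i * dy - PySem.Int.floordiv dx 2 + dx - 1) dx)) := by
  obtain ⟨hh0, hh1⟩ := half_bounds dx hdx
  have h0 := loopX_eq x0 y0 x1 y1 sx sy dx dy (PySem.Int.floordiv dx 2)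
    hdx hdy0 hxy hx1 hy1 hsx hh0 hh1 ms.toNat 0 0 (PySem.Int.floordiv dx 2) []
    le_rfl (le_of_lt hdx) (by ring) hh0 hh1
  rw [show x0 + sx * 0 = x0 by ring, show y0 + sy * 0 = y0 by ring] at h0
  rw [h0]
  norm_num

theorem line_main (x0 y0 x1 y1 ms : Int) : line_to_py x0 y0 x1 y1 ms = line_to_py_alt x0 y0 x1 y1 ms := by
  simp only [line_to_py, line_to_py_alt, pvSign_eq]
  by_cases hmaj : |x1 - x0| ≥ |y1 - y0|
  · rw [if_pos hmaj, if_pos hmaj]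
    by_cases hx : x1 = x0
    · have h1 : |x1 - x0| = 0 := by simp [hx]
      have h2 : |y1 - y0| = 0 := by have := abs_nonneg (y1 - y0); omega
      rw [loopX_self _ _ _ _ _ _ _ _ _ _ _ hx.symm (by have := abs_eq_zero.mp h2; omega)]
      have h3 : min (max ms 0) |x1 - x0| = 0 := by omega
      rw [h3, show PySem.List.pyRange 1 (0+1) = [] by simp]
      simp
    · have hdx : 0 < |x1 - x0| := abs_pos.mpr (sub_ne_zero.mpr hx)
      exact branchX x0 y0 x1 y1 _ _ _ _ ms hdx (abs_nonneg _) hmaj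
        (pvSign_mul_abs x0 x1) (pvSign_mul_abs y0 y1) (pvSign_pm x0 x1 hx)
  · rw [if_neg hmaj, if_neg hmaj]
    rw [not_le] at hmaj
    have hdy : 0 < |y1 - y0| := lt_of_le_of_lt (abs_nonneg _) hmaj
    have hy : ¬ y1 = y0 := fun hc => by simp [hc] at hdy
    rw [loopY_swap, List.map_nil]
    rw [branchX y0 x0 y1 x1 _ _ _ _ ms hdy (abs_nonneg _) (le_of_lt hmaj)
      (pvSign_mul_abs y0 y1) (pvSign_mul_abs x0 x1) (pvSign_pm y0 y1 hy)]
    rw [List.map_map]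
    rfl

-- ===== VERDICT (by name: the statement is the Claim_ definition above) =====
theorem line_to_py_spec : Claim_equal_line_to_py := by
  intro x0 y0 x1 y1 ms _
  exact line_main x0 y0 x1 y1 ms
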